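-- pv_equiv track=rewrite | github.com/yelircaasi/listen-attend-transcribe | src/data_prep/_data_utils.py | decode_fn
-- ===== SOURCE A (Python) =====
-- def decode_fn(s_in):
--     """
--     A function for the Pytorch-NLP tokenizer to decode sequences.
--     Args:
--         s_in (list of strings): Words.
--     Returns:
--         s_out (string): Sentence.
--     """
--     s_out = []
--     for w in s_in:
--         if w == '<s>':
--             continue
--         elif w=='</s>':
--             break
--         s_out.append(w)
--     s_out = ' '.join(s_out)
--     return s_out
-- ===== SOURCE B (Python) =====
-- def decode_fn(s_in):
--     """
--     A function for the Pytorch-NLP tokenizer to decode sequences.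
--     Args:
--         s_in (list of strings): Words.
--     Returns:
--         s_out (string): Sentence.
--     """
--     if '</s>' in s_in:
--         prefix = s_in[:s_in.index('</s>')]
--     else:
--         prefix = s_in
--     return ' '.join(w for w in prefix if w != '<s>')
-- ===== Notes on version B (the rewrite author's own statement) =====
-- stated objective: idiomatic
-- what changed: Replaced the interleaved continue/break accumulator loop with a locate-the-boundary pass (first '</s>' via index, slice the prefix) followed by a single filtering join.
import Mathlib
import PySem

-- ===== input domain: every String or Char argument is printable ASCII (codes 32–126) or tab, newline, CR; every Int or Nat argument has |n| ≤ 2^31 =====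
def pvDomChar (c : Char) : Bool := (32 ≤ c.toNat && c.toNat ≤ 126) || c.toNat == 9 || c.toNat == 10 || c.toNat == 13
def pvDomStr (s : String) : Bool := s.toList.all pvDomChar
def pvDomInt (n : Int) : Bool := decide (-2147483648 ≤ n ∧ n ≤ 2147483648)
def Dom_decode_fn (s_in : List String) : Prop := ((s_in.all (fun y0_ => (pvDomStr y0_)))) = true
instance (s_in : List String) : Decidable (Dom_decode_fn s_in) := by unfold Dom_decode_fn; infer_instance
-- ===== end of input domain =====

-- B replaces A's interleaved continue/break loop by a boundary-locate (first '</s>') + prefix filter + join; same result, proved equal.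


-- ===== PORT A =====
-- the for-loop with continue/break, as structural recursion over s_in with the same branch order
def decodeLoopA : List String → List String
  | [] => []
  | w :: ws =>
      if w == "<s>" then decodeLoopA ws
      else if w == "</s>" then []
      else w :: decodeLoopA ws

def decode_fn (s_in : List String) : String :=
  PySem.Str.join " " (decodeLoopA s_in)

-- ===== PORT B =====
def decode_fn_alt (s_in : List String) : String :=
  let pre :=
    match PySem.List.index? s_in "</s>" with
    | some idx => PySem.List.slice s_in none (some (idx : Int))
    | none => s_in
  PySem.Str.join " " (pre.filter (fun w => w != "<s>"))

-- ===== PRECONDITION & SPEC =====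
def Spec_decode_fn (s_in : List String) (out : String) : Prop := out = decode_fn_alt s_in
instance (s_in : List String) (out : String) : Decidable (Spec_decode_fn s_in out) := by unfold Spec_decode_fn; infer_instance

-- ===== CLAIM (what is proved, stated in full; the proofs are below) =====
def Claim_equal_decode_fn : Prop := ∀ (s_in : List String), Dom_decode_fn s_in → Spec_decode_fn s_in (decode_fn s_in)

-- ===== LEMMAS AND PROOFS =====
theorem decodeLoopA_eq (s : List String) :
    decodeLoopA s =
      (match PySem.List.index? s "</s>" with
        | some idx => PySem.List.slice s none (some (idx : Int))
        | none => s).filter (fun w => w != "<s>") := by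
  induction s with
  | nil => simp [decodeLoopA, PySem.List.index?]
  | cons w ws ih =>
      by_cases hE : w = "</s>"
      · subst hE
        rw [PySem.List.index?_cons_self]
        have h0 : PySem.List.slice ("</s>" :: ws) none (some (0:Int)) = [] := by
          rw [PySem.List.slice_to _ (by norm_num)]; simp
        simp [decodeLoopA, h0]
      · rw [PySem.List.index?_cons_of_ne ws hE]
        cases hidx : PySem.List.index? ws "</s>" with
        | none =>
            simp only [Option.map_none]
            rw [decodeLoopA, ih, hidx]
            by_cases hS : w = "<s>" <;> simp [hS, hE]
        | some k =>
            simp only [Option.map_some]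
            rw [decodeLoopA, ih, hidx]
            have hsl : PySem.List.slice (w :: ws) none (some ((k : Int) + 1)) =
                w :: List.take k ws := by
              have h := PySem.List.slice_to_natCast (w :: ws) (k + 1)
              push_cast at h
              rw [h, List.take_succ_cons]
            by_cases hS : w = "<s>"
            · subst hS
              simp [hE, hsl, PySem.List.slice_to_natCast]
            · simp [hS, hE, hsl, PySem.List.slice_to_natCast]

-- ===== VERDICT (by name: the statement is the Claim_ definition above) =====
theorem decode_fn_spec : Claim_equal_decode_fn := by
  intro s _
  unfold Spec_decode_fn decode_fn decode_fn_alt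
  rw [decodeLoopA_eq]
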